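-- pv_equiv track=rewrite | github.com/carl24tech/Supabase-Scanner | scanner/table_scanner.py | _flag_sensitive_columns
-- ===== SOURCE A (Python) =====
-- from typing import List, Dict, Any, Tuple, Optional
--
-- SENSITIVE_COLUMN_PATTERNS = [
--     "password", "passwd", "pwd", "secret", "token", "api_key", "apikey",
--     "private_key", "credit_card", "card_number", "cvv", "ssn",
--     "social_security", "bank_account", "stripe", "twilio", "sendgrid",
--     "firebase", "aws_", "gcp_", "azure_", "otp", "pin", "dob",
--     "date_of_birth", "national_id", "passport", "salary", "income",
--     "hash", "encrypted", "auth_token", "refresh_token", "access_token",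
--     "webhook", "private", "internal", "jwt", "bearer", "signing_key",
-- ]
--
-- def _flag_sensitive_columns(columns: List[str]) -> List[str]:
--     hits = []
--     for col in columns:
--         lower = col.lower()
--         for pattern in SENSITIVE_COLUMN_PATTERNS:
--             if pattern in lower:
--                 hits.append(col)
--                 break
--     return hits
-- ===== SOURCE B (Python) =====
-- from typing import List, Dict
--
-- # All sensitive substrings in one blob, split once at import time.
-- _PATTERN_BLOB = ("password passwd pwd secret token api_key apikey "
--                  "private_key credit_card card_number cvv ssn "
--                  "social_security bank_account stripe twilio sendgrid "
--                  "firebase aws_ gcp_ azure_ otp pin dob "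
--                  "date_of_birth national_id passport salary income "
--                  "hash encrypted auth_token refresh_token access_token "
--                  "webhook private internal jwt bearer signing_key")
--
-- # First-character index: bucket the patterns by their first letter once, so each
-- # position of a column is checked only against the patterns that can start there.
-- _INDEX: Dict[str, List[str]] = {}
-- for _p in _PATTERN_BLOB.split():
--     _INDEX[_p[0]] = _INDEX.get(_p[0], []) + [_p]
--
-- def _hit(lower: str) -> bool:
--     return any(lower.startswith(p, i)
--                for i, ch in enumerate(lower)
--                for p in _INDEX.get(ch, ()))
--
-- def _flag_sensitive_columns(columns: List[str]) -> List[str]: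
--     return [col for col in columns if _hit(col.lower())]
-- ===== Notes on version B (the rewrite author's own statement) =====
-- stated objective: alternative
-- what changed: Replaces the pattern-major loop (each of the 41 patterns substring-searched in each column with break) by a position-major scan: the patterns live in one blob string split once into a first-character index dict, and each position of the lowered column is tested only against the patterns bucketed under its character.
import Mathlib
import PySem

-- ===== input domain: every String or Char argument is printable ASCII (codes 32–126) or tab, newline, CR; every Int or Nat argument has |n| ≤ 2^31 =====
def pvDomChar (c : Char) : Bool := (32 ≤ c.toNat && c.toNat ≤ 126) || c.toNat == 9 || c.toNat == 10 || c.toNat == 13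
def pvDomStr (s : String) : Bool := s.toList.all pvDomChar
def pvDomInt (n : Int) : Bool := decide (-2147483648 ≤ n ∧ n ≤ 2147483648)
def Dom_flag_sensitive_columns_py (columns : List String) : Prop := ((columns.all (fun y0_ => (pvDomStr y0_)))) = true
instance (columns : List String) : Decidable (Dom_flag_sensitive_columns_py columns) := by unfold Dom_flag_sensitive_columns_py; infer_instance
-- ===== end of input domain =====

-- ===== PORT A =====
-- A = B on all inputs; B replaces the pattern-major substring loop by a position-major
-- scan over a first-character index of the patterns (alternative structure, same cost class).
def SENSITIVE_COLUMN_PATTERNS : List String :=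
  ["password", "passwd", "pwd", "secret", "token", "api_key", "apikey",
   "private_key", "credit_card", "card_number", "cvv", "ssn",
   "social_security", "bank_account", "stripe", "twilio", "sendgrid",
   "firebase", "aws_", "gcp_", "azure_", "otp", "pin", "dob",
   "date_of_birth", "national_id", "passport", "salary", "income",
   "hash", "encrypted", "auth_token", "refresh_token", "access_token",
   "webhook", "private", "internal", "jwt", "bearer", "signing_key"]

-- 'for pattern …: if pattern in lower: hits.append(col); break' = append iff some pattern is in lower
def flag_sensitive_columns_py (columns : List String) : List String :=
  columns.foldl (fun hits col =>
    let lower := PySem.Str.lower col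
    if SENSITIVE_COLUMN_PATTERNS.any (fun pattern => PySem.Str.isIn pattern lower)
    then hits ++ [col] else hits) []

-- ===== PORT B =====
-- _PATTERN_BLOB: every sensitive substring in one string, split once at load
def pvPatternBlob : String :=
  "password passwd pwd secret token api_key apikey private_key credit_card card_number cvv ssn social_security bank_account stripe twilio sendgrid firebase aws_ gcp_ azure_ otp pin dob date_of_birth national_id passport salary income hash encrypted auth_token refresh_token access_token webhook private internal jwt bearer signing_key"

-- _INDEX[_p[0]] = _INDEX.get(_p[0], []) + [_p]   (keyed by the first character of each blob word)
def pvIndex : PySem.Dict Char (List String) :=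
  (PySem.Str.split₀ pvPatternBlob).foldl
    (fun d p => d.insert (p.toList.headD ' ') (d.getD (p.toList.headD ' ') [] ++ [p]))
    PySem.Dict.empty

-- 'any(lower.startswith(p, i) for i, ch in enumerate(lower) for p in _INDEX.get(ch, ()))':
-- recursion on the suffix lower[i:] (= ch :: rest); startswith(p, i) = p prefix of that suffix
def pvScan (cs : List Char) : Bool :=
  match cs with
  | [] => false
  | ch :: rest =>
      (pvIndex.getD ch []).any (fun p => p.toList.isPrefixOf (ch :: rest)) || pvScan rest

-- '[col for col in columns if _hit(col.lower())]'
def flag_sensitive_columns_py_alt (columns : List String) : List String :=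
  columns.filter (fun col => pvScan (PySem.Str.lower col).toList)

-- ===== PRECONDITION & SPEC =====
def Spec_flag_sensitive_columns_py (columns : List String) (out : List String) : Prop := out = flag_sensitive_columns_py_alt columns
instance (columns : List String) (out : List String) : Decidable (Spec_flag_sensitive_columns_py columns out) := by unfold Spec_flag_sensitive_columns_py; infer_instance

-- ===== CLAIM (what is proved, stated in full; the proofs are below) =====
def Claim_equal_flag_sensitive_columns_py : Prop := ∀ (columns : List String), Dom_flag_sensitive_columns_py columns → Spec_flag_sensitive_columns_py columns (flag_sensitive_columns_py columns)

-- ===== LEMMAS AND PROOFS =====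

-- the first-character index, evaluated once to a literal
def pvKeyChars : List Char :=
  ['p', 's', 't', 'a', 'c', 'b', 'f', 'g', 'o', 'd', 'n', 'i', 'h', 'e', 'r', 'w', 'j']

def pvIndexLit : PySem.Dict Char (List String) := PySem.Dict.mk
  [('p', ["password", "passwd", "pwd", "private_key", "pin", "passport", "private"]),
   ('s', ["secret", "ssn", "social_security", "stripe", "sendgrid", "salary", "signing_key"]),
   ('t', ["token", "twilio"]), ('a', ["api_key", "apikey", "aws_", "azure_", "auth_token", "access_token"]),
   ('c', ["credit_card", "card_number", "cvv"]), ('b', ["bank_account", "bearer"]), ('f', ["firebase"]),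
   ('g', ["gcp_"]), ('o', ["otp"]), ('d', ["dob", "date_of_birth"]), ('n', ["national_id"]),
   ('i', ["income", "internal"]), ('h', ["hash"]), ('e', ["encrypted"]), ('r', ["refresh_token"]),
   ('w', ["webhook"]), ('j', ["jwt"])]

set_option maxRecDepth 100000 in
theorem pvIndex_eq : pvIndex = pvIndexLit := by decide

-- every pattern is nonempty
theorem pv_patterns_ne_nil : ∀ p ∈ SENSITIVE_COLUMN_PATTERNS, p.toList ≠ [] := by decide

-- every pattern's first character is one of the index keys
theorem pv_heads_mem : ∀ p ∈ SENSITIVE_COLUMN_PATTERNS, p.toList.headD ' ' ∈ pvKeyChars := by decide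

-- each bucket is exactly the patterns starting with that character, in order
set_option maxRecDepth 10000 in
theorem pv_bucket_eq_filter (c : Char) :
    pvIndex.getD c [] = SENSITIVE_COLUMN_PATTERNS.filter (fun p => p.toList.headD ' ' == c) := by
  rw [pvIndex_eq]
  by_cases hk : c ∈ pvKeyChars
  · fin_cases hk <;> decide
  · have h1 : pvIndexLit.getD c [] = [] := by
      apply PySem.Dict.getD_of_not_contains
      rw [PySem.Dict.contains_eq_decide_mem_keys]
      have : pvIndexLit.keys = pvKeyChars := by decide
      simp [this, hk]
    have h2 : SENSITIVE_COLUMN_PATTERNS.filter (fun p => p.toList.headD ' ' == c) = [] := by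
      rw [List.filter_eq_nil_iff]
      intro p hp
      simp only [beq_iff_eq]
      intro hEq
      exact hk (hEq ▸ pv_heads_mem p hp)
    rw [h1, h2]

theorem pv_head_of_prefix (p : String) (hp : p.toList ≠ []) (c : Char) (cs : List Char)
    (h : p.toList <+: (c :: cs)) : p.toList.headD ' ' = c := by
  rcases h with ⟨t, ht⟩
  cases hl : p.toList with
  | nil => exact absurd hl hp
  | cons a as =>
      rw [hl] at ht
      simp at ht
      simp [ht.1]

-- the bucket test at a position equals the full-pattern-list test at that position
theorem pv_bucket_any (c : Char) (cs : List Char) :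
    (pvIndex.getD c []).any (fun p => p.toList.isPrefixOf (c :: cs))
      = SENSITIVE_COLUMN_PATTERNS.any (fun p => p.toList.isPrefixOf (c :: cs)) := by
  rw [pv_bucket_eq_filter, Bool.eq_iff_iff, List.any_eq_true, List.any_eq_true]
  constructor
  · rintro ⟨p, hp, hpre⟩
    exact ⟨p, (List.mem_filter.mp hp).1, hpre⟩
  · rintro ⟨p, hp, hpre⟩
    refine ⟨p, List.mem_filter.mpr ⟨hp, ?_⟩, hpre⟩
    simpa using pv_head_of_prefix p (pv_patterns_ne_nil p hp) c cs (List.isPrefixOf_iff_prefix.mp hpre)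

theorem pv_scan_iff (cs : List Char) :
    pvScan cs = true ↔ ∃ p ∈ SENSITIVE_COLUMN_PATTERNS, p.toList <:+: cs := by
  induction cs with
  | nil =>
      simp only [pvScan]
      constructor
      · intro h; cases h
      · rintro ⟨p, hp, hinf⟩
        exact absurd (List.eq_nil_of_infix_nil hinf) (pv_patterns_ne_nil p hp)
  | cons c rest ih =>
      simp only [pvScan, pv_bucket_any, Bool.or_eq_true, List.any_eq_true, ih]
      constructor
      · rintro (⟨p, hp, hpre⟩ | ⟨p, hp, hinf⟩)
        · exact ⟨p, hp, (List.infix_cons_iff).mpr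
            (Or.inl (List.isPrefixOf_iff_prefix.mp hpre))⟩
        · exact ⟨p, hp, (List.infix_cons_iff).mpr (Or.inr hinf)⟩
      · rintro ⟨p, hp, hinf⟩
        rcases (List.infix_cons_iff).mp hinf with hpre | hinf'
        · exact Or.inl ⟨p, hp, List.isPrefixOf_iff_prefix.mpr hpre⟩
        · exact Or.inr ⟨p, hp, hinf'⟩

theorem pv_cond_eq (lower : String) :
    pvScan lower.toList
      = SENSITIVE_COLUMN_PATTERNS.any (fun pattern => PySem.Str.isIn pattern lower) := by
  rw [Bool.eq_iff_iff, pv_scan_iff, List.any_eq_true]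
  constructor
  · rintro ⟨p, hp, hinf⟩
    exact ⟨p, hp, (PySem.Str.isIn_iff_infix p lower).mpr hinf⟩
  · rintro ⟨p, hp, hIn⟩
    exact ⟨p, hp, (PySem.Str.isIn_iff_infix p lower).mp hIn⟩

-- ===== VERDICT (by name: the statement is the Claim_ definition above) =====
theorem flag_sensitive_columns_py_spec : Claim_equal_flag_sensitive_columns_py := by
  intro columns _
  unfold Spec_flag_sensitive_columns_py flag_sensitive_columns_py flag_sensitive_columns_py_alt
  rw [PySem.List.foldl_append_if_eq_filter]
  simp only [pv_cond_eq, List.nil_append]
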